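-- pv_equiv track=rewrite | github.com/nstivoh/afyaplate-ke | rebuild_db_from_xlsx.py | assign_codes
-- ===== SOURCE A (Python) =====
-- CATEGORY_BOUNDARIES = {
--     "01": (0,   15),
--     "02": (15,  25),
--     "03": (25,  30),
--     "04": (30,  128),
--     "05": (128, 167),
--     "06": (167, 198),
--     "07": (198, 257),
--     "08": (257, 299),
--     "09": (299, 312),
--     "10": (312, 327),
--     "11": (327, 330),
--     "12": (330, 339),
--     "13": (339, 374),
--     "14": (374, 378),
--     "15": (378, 513),
-- }
--
-- def assign_codes(foods_in_order):
--     pos_to_prefix = {}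
--     for prefix, (start, end) in CATEGORY_BOUNDARIES.items():
--         for i in range(start, end):
--             pos_to_prefix[i] = prefix
--
--     cat_counters = {p: 1 for p in CATEGORY_BOUNDARIES}
--     result = []
--     for i, food_name in enumerate(foods_in_order):
--         prefix = pos_to_prefix.get(i, "99")
--         seq = cat_counters.get(prefix, 1)
--         code = f"{prefix}{seq:03d}"
--         cat_counters[prefix] = seq + 1
--         result.append((food_name, code, prefix))
--     return result
-- ===== SOURCE B (Python) =====
-- CATEGORY_BOUNDARIES = {
--     "01": (0,   15),
--     "02": (15,  25),
--     "03": (25,  30),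
--     "04": (30,  128),
--     "05": (128, 167),
--     "06": (167, 198),
--     "07": (198, 257),
--     "08": (257, 299),
--     "09": (299, 312),
--     "10": (312, 327),
--     "11": (327, 330),
--     "12": (330, 339),
--     "13": (339, 374),
--     "14": (374, 378),
--     "15": (378, 513),
-- }
--
--
-- def _locate(i):
--     """Category prefix and range start for position i (closed form, no counters)."""
--     if i >= 513:
--         return "99", 513
--     for prefix, (start, end) in CATEGORY_BOUNDARIES.items():
--         if i < end:
--             return prefix, start
--
--
-- def assign_codes(foods_in_order):
--     result = []
--     for i, food_name in enumerate(foods_in_order):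
--         prefix, start = _locate(i)
--         seq = i - start + 1
--         result.append((food_name, f"{prefix}{seq:03d}", prefix))
--     return result
-- ===== Notes on version B (the rewrite author's own statement) =====
-- stated objective: simpler
-- what changed: B drops A's 513-entry position-to-prefix dict and the per-category counter dict: it locates the category range of each index by a constant scan of the 15 boundaries and computes the sequence number by the closed form i - start + 1.
import Mathlib
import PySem

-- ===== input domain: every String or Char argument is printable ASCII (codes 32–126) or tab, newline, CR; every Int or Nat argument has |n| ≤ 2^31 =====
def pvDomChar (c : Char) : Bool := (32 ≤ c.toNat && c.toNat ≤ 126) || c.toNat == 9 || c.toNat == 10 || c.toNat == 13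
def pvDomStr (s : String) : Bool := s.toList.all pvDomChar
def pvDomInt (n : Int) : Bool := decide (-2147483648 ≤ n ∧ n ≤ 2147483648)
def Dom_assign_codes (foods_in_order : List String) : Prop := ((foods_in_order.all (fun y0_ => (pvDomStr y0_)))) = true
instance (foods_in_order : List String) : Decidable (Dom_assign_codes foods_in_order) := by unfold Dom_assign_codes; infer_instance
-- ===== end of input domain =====

-- B replaces A's 513-entry position→prefix dict and per-category counter dict by a constant
-- scan of the 15 boundaries plus the closed form seq = i - start + 1 (objective: simpler).

-- CATEGORY_BOUNDARIES, shared by both Pythons, as an (insertion-ordered) association list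
def catBoundaries : List (String × Int × Int) :=
  [("01", 0, 15), ("02", 15, 25), ("03", 25, 30), ("04", 30, 128), ("05", 128, 167),
   ("06", 167, 198), ("07", 198, 257), ("08", 257, 299), ("09", 299, 312), ("10", 312, 327),
   ("11", 327, 330), ("12", 330, 339), ("13", 339, 374), ("14", 374, 378), ("15", 378, 513)]

-- f"{n:03d}" (exact for n ≥ 0, the only values either program formats)
def py03d (n : Int) : String :=
  let cs := PySem.Int.toChars n
  String.ofList (List.replicate (3 - cs.length) '0' ++ cs)

-- ===== PORT A =====
-- pos_to_prefix = {i: prefix for each prefix,(start,end), i in range(start,end)}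
def posToPrefixA : PySem.Dict Int String :=
  catBoundaries.foldl
    (fun d pse => (PySem.List.pyRange pse.2.1 pse.2.2 1).foldl (fun d i => d.insert i pse.1) d)
    PySem.Dict.empty

-- cat_counters = {p: 1 for p in CATEGORY_BOUNDARIES}
def catCountersA : PySem.Dict String Int :=
  catBoundaries.foldl (fun d pse => d.insert pse.1 1) PySem.Dict.empty

-- the body of A's loop over enumerate(foods_in_order)
def stepA (acc : PySem.Dict String Int × List (String × String × String)) (p : Int × String) :
    PySem.Dict String Int × List (String × String × String) :=
  let pfx := posToPrefixA.getD p.1 "99"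
  let seq := acc.1.getD pfx 1
  let code := pfx ++ py03d seq
  (acc.1.insert pfx (seq + 1), acc.2 ++ [(p.2, code, pfx)])

def assign_codes (foods_in_order : List String) : List (String × String × String) :=
  ((PySem.List.enumerate foods_in_order 0).foldl stepA (catCountersA, [])).2

-- ===== PORT B =====
-- _locate's scan of CATEGORY_BOUNDARIES.items(); [] is unreachable for 0 ≤ i < 513
def locRec : List (String × Int × Int) → Int → String × Int
  | [], _ => ("99", 513)
  | pse :: rest, i => if i < pse.2.2 then (pse.1, pse.2.1) else locRec rest i

def locate (i : Int) : String × Int :=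
  if i ≥ 513 then ("99", 513) else locRec catBoundaries i

-- the body of B's loop over enumerate(foods_in_order)
def altFun (p : Int × String) : String × String × String :=
  let ps := locate p.1
  let seq := p.1 - ps.2 + 1
  (p.2, ps.1 ++ py03d seq, ps.1)

def assign_codes_alt (foods_in_order : List String) : List (String × String × String) :=
  (PySem.List.enumerate foods_in_order 0).map altFun

-- ===== PRECONDITION & SPEC =====
def Spec_assign_codes (foods_in_order : List String) (out : List (String × String × String)) : Prop := out = assign_codes_alt foods_in_order
instance (foods_in_order : List String) (out : List (String × String × String)) : Decidable (Spec_assign_codes foods_in_order out) := by unfold Spec_assign_codes; infer_instance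

-- ===== CLAIM (what is proved, stated in full; the proofs are below) =====
def Claim_equal_assign_codes : Prop := ∀ (foods_in_order : List String), Dom_assign_codes foods_in_order → Spec_assign_codes foods_in_order (assign_codes foods_in_order)

-- ===== LEMMAS AND PROOFS =====

-- the boundary list is a contiguous chain of ranges from lo up to 513
def chainFrom : Int → List (String × Int × Int) → Prop
  | lo, [] => lo = 513
  | lo, pse :: rest => pse.2.1 = lo ∧ lo < pse.2.2 ∧ chainFrom pse.2.2 rest

theorem chainFrom_cat : chainFrom 0 catBoundaries := by
  simp [chainFrom, catBoundaries]

theorem chainFrom_le (L : List (String × Int × Int)) :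
    ∀ lo : Int, chainFrom lo L → lo ≤ 513 := by
  induction L with
  | nil => intro lo h; simp [chainFrom] at h; omega
  | cons pse rest ih =>
      intro lo h
      obtain ⟨-, h2, h3⟩ := h
      have := ih _ h3
      omega

-- the scan lands inside the chain: lo ≤ start ≤ i
theorem locRec_bounds (L : List (String × Int × Int)) :
    ∀ lo i : Int, chainFrom lo L → lo ≤ i → i < 513 →
      lo ≤ (locRec L i).2 ∧ (locRec L i).2 ≤ i := by
  induction L with
  | nil => intro lo i h hlo hi; simp [chainFrom] at h; omega
  | cons pse rest ih =>
      intro lo i h hlo hi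
      obtain ⟨h1, h2, h3⟩ := h
      by_cases hc : i < pse.2.2
      · simp only [locRec, if_pos hc]; omega
      · simp only [locRec, if_neg hc]
        have := ih pse.2.2 i h3 (by omega) hi
        omega

-- the scan's result is some entry of the list
theorem locRec_mem (L : List (String × Int × Int)) :
    ∀ lo i : Int, chainFrom lo L → lo ≤ i → i < 513 →
      ∃ pse ∈ L, locRec L i = (pse.1, pse.2.1) := by
  induction L with
  | nil => intro lo i h hlo hi; simp [chainFrom] at h; omega
  | cons pse rest ih =>
      intro lo i h hlo hi
      obtain ⟨h1, h2, h3⟩ := h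
      by_cases hc : i < pse.2.2
      · exact ⟨pse, List.mem_cons_self, by simp only [locRec, if_pos hc]⟩
      · obtain ⟨q, hq, he⟩ := ih pse.2.2 i h3 (by omega) hi
        exact ⟨q, List.mem_cons_of_mem _ hq, by simp only [locRec, if_neg hc]; exact he⟩

-- any position k from the found range start up to i scans to the same entry
theorem locRec_same (L : List (String × Int × Int)) :
    ∀ lo i k : Int, chainFrom lo L → lo ≤ k → k ≤ i → i < 513 →
      (locRec L i).2 ≤ k → locRec L k = locRec L i := by
  induction L with
  | nil => intro lo i k h hlo hk hi _; simp [chainFrom] at h; omega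
  | cons pse rest ih =>
      intro lo i k h hlo hk hi hs
      obtain ⟨h1, h2, h3⟩ := h
      by_cases hc : i < pse.2.2
      · simp only [locRec, if_pos hc] at hs ⊢
        rw [if_pos (by omega)]
      · simp only [locRec, if_neg hc] at hs ⊢
        have hb := locRec_bounds rest pse.2.2 i h3 (by omega) hi
        rw [if_neg (by omega)]
        exact ih pse.2.2 i k h3 (by omega) hk hi hs

-- distinct prefixes: the found prefix pins down the entry, hence the start
theorem locRec_fst_inj (L : List (String × Int × Int)) :
    ∀ lo i k : Int, chainFrom lo L → (L.map (·.1)).Nodup → lo ≤ i → i < 513 → lo ≤ k → k < 513 →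
      (locRec L i).1 = (locRec L k).1 → (locRec L i).2 = (locRec L k).2 := by
  induction L with
  | nil => intro lo i k h _ hlo hi _ _ _; simp [chainFrom] at h; omega
  | cons pse rest ih =>
      intro lo i k h hnd hloi hi hlok hk heq
      obtain ⟨h1, h2, h3⟩ := h
      simp only [List.map_cons, List.nodup_cons] at hnd
      by_cases hci : i < pse.2.2 <;> by_cases hck : k < pse.2.2
      · simp only [locRec, if_pos hci, if_pos hck]
      · simp only [locRec, if_pos hci, if_neg hck] at heq ⊢
        obtain ⟨q, hq, he⟩ := locRec_mem rest pse.2.2 k h3 (by omega) hk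
        rw [he] at heq
        exact absurd (heq ▸ List.mem_map_of_mem hq) hnd.1
      · simp only [locRec, if_neg hci, if_pos hck] at heq ⊢
        obtain ⟨q, hq, he⟩ := locRec_mem rest pse.2.2 i h3 (by omega) hi
        rw [he] at heq
        exact absurd (heq ▸ List.mem_map_of_mem hq) hnd.1
      · simp only [locRec, if_neg hci, if_neg hck] at heq ⊢
        exact ih pse.2.2 i k h3 hnd.2 (by omega) hi (by omega) hk heq

-- locate's range start is between 0 and i
theorem locate_start_bounds (i : Int) (h : 0 ≤ i) : 0 ≤ (locate i).2 ∧ (locate i).2 ≤ i := by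
  unfold locate
  by_cases hc : i ≥ 513
  · rw [if_pos hc]; constructor <;> omega
  · rw [if_neg hc]
    exact locRec_bounds catBoundaries 0 i chainFrom_cat h (by omega)

-- any index k inside the located range of i locates identically
theorem locate_same (i k : Int) (h0 : 0 ≤ k) (hk : k ≤ i) (hs : (locate i).2 ≤ k) :
    locate k = locate i := by
  unfold locate at hs ⊢
  by_cases hc : i ≥ 513
  · rw [if_pos hc] at hs ⊢
    rw [if_pos (by omega)]
  · rw [if_neg hc] at hs ⊢
    rw [if_neg (by omega)]
    exact locRec_same catBoundaries 0 i k chainFrom_cat h0 hk (by omega) hs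

-- equal prefixes come from the same category, hence the same start
theorem locate_fst_inj (i k : Int) (hi : 0 ≤ i) (hk : 0 ≤ k)
    (heq : (locate i).1 = (locate k).1) : (locate i).2 = (locate k).2 := by
  have hnd : (catBoundaries.map (·.1)).Nodup := by decide
  have h99 : "99" ∉ catBoundaries.map (·.1) := by decide
  unfold locate at heq ⊢
  by_cases hci : i ≥ 513 <;> by_cases hck : k ≥ 513
  · rw [if_pos hci, if_pos hck]
  · rw [if_pos hci] at heq ⊢
    rw [if_neg hck] at heq ⊢
    obtain ⟨q, hq, he⟩ := locRec_mem catBoundaries 0 k chainFrom_cat hk (by omega)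
    rw [he] at heq
    have hq1 : q.1 = "99" := by simpa using heq.symm
    exact absurd (hq1 ▸ List.mem_map_of_mem hq) h99
  · rw [if_neg hci] at heq ⊢
    rw [if_pos hck] at heq ⊢
    obtain ⟨q, hq, he⟩ := locRec_mem catBoundaries 0 i chainFrom_cat hi (by omega)
    rw [he] at heq
    have hq1 : q.1 = "99" := by simpa using heq
    exact absurd (hq1 ▸ List.mem_map_of_mem hq) h99
  · rw [if_neg hci] at heq ⊢
    rw [if_neg hck] at heq ⊢
    exact locRec_fst_inj catBoundaries 0 i k chainFrom_cat hnd hi (by omega) hk (by omega) heq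

-- looking up i in a dict after inserting i ↦ p for every i in range(s, e)

theorem getD_fold_range (p : String) (i : Int) (q : String) :
    ∀ (n : Nat) (s e : Int) (d : PySem.Dict Int String), (e - s).toNat = n →
      ((PySem.List.pyRange s e 1).foldl (fun d j => d.insert j p) d).getD i q
        = if s ≤ i ∧ i < e then p else d.getD i q := by
  intro n
  induction n with
  | zero =>
      intro s e d hn
      rw [PySem.List.pyRange_one_eq_nil (by omega)]
      simp only [List.foldl_nil]
      rw [if_neg (by omega)]
  | succ n ih =>
      intro s e d hn
      rw [PySem.List.pyRange_one_cons (by omega)]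
      simp only [List.foldl_cons]
      rw [ih (s + 1) e (d.insert s p) (by omega)]
      rw [PySem.Dict.getD_insert]
      split_ifs <;> first | rfl | omega

-- A's position table over a chain of ranges computes B's scan
theorem posFold_eq_locRec (L : List (String × Int × Int)) :
    ∀ (lo i : Int) (d : PySem.Dict Int String), chainFrom lo L →
      (L.foldl
        (fun d pse => (PySem.List.pyRange pse.2.1 pse.2.2 1).foldl (fun d i => d.insert i pse.1) d)
        d).getD i "99"
        = if lo ≤ i ∧ i < 513 then (locRec L i).1 else d.getD i "99" := by
  induction L with
  | nil =>
      intro lo i d h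
      simp [chainFrom] at h
      subst h
      simp only [List.foldl_nil, locRec]
      split_ifs <;> first | rfl | omega
  | cons pse rest ih =>
      intro lo i d h
      obtain ⟨h1, h2, h3⟩ := h
      have he513 := chainFrom_le rest _ h3
      simp only [List.foldl_cons]
      rw [ih pse.2.2 i _ h3]
      by_cases hc : pse.2.2 ≤ i ∧ i < 513
      · rw [if_pos hc, if_pos (by omega)]
        simp only [locRec, if_neg (by omega : ¬ i < pse.2.2)]
      · rw [if_neg hc, getD_fold_range pse.1 i "99" ((pse.2.2 - pse.2.1).toNat) pse.2.1 pse.2.2 d rfl]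
        by_cases hc2 : pse.2.1 ≤ i ∧ i < pse.2.2
        · rw [if_pos hc2, if_pos (by omega)]
          simp only [locRec, if_pos hc2.2]
        · rw [if_neg hc2, if_neg (by omega)]

-- hence A's dict lookup is B's locate
theorem posToPrefixA_eq_locate (i : Int) (h : 0 ≤ i) :
    posToPrefixA.getD i "99" = (locate i).1 := by
  unfold posToPrefixA locate
  rw [posFold_eq_locRec catBoundaries 0 i _ chainFrom_cat]
  by_cases hc : i ≥ 513
  · rw [if_neg (by omega), if_pos hc]
    simp [PySem.Dict.getD_empty]
  · rw [if_pos (by omega), if_neg hc]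

-- every value of a dict built by inserting 1 for each prefix is 1 (under default 1)
theorem getD_fold_insert_one (L : List (String × Int × Int)) :
    ∀ d : PySem.Dict String Int, (∀ p : String, d.getD p 1 = 1) →
      ∀ p : String, (L.foldl (fun d pse => d.insert pse.1 1) d).getD p 1 = 1 := by
  induction L with
  | nil => intro d hd p; simpa using hd p
  | cons pse rest ih =>
      intro d hd p
      simp only [List.foldl_cons]
      refine ih _ (fun p => ?_) p
      rw [PySem.Dict.getD_insert]
      split_ifs <;> first | rfl | exact hd p

-- every value of A's initial counter dict is 1
theorem catCountersA_getD_one (p : String) : catCountersA.getD p 1 = 1 := by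
  unfold catCountersA
  exact getD_fold_insert_one catBoundaries PySem.Dict.empty
    (fun p => by rw [PySem.Dict.getD_empty]) p

-- the loop invariant: after processing indices < k, the counter of the category of any
-- upcoming index i equals 1 + (number of already-processed indices in that category)
def InvA (k : Int) (d : PySem.Dict String Int) : Prop :=
  ∀ i : Int, 0 ≤ i → k ≤ i →
    d.getD (locate i).1 1 = if (locate i).2 ≤ k then k - (locate i).2 + 1 else 1

theorem foldA_inv (xs : List String) :
    ∀ (k : Int) (d : PySem.Dict String Int) (acc : List (String × String × String)),
      0 ≤ k → InvA k d →
      ((PySem.List.enumerate xs k).foldl stepA (d, acc)).2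
        = acc ++ (PySem.List.enumerate xs k).map altFun := by
  induction xs with
  | nil => intro k d acc _ _; simp [PySem.List.enumerate_nil]
  | cons x xs ih =>
      intro k d acc hk hinv
      rw [PySem.List.enumerate_cons]
      simp only [List.foldl_cons, List.map_cons]
      have hseq : d.getD (locate k).1 1 = k - (locate k).2 + 1 := by
        rw [hinv k hk le_rfl, if_pos (locate_start_bounds k hk).2]
      have hstep : stepA (d, acc) (k, x)
          = (d.insert (locate k).1 (k - (locate k).2 + 1 + 1), acc ++ [altFun (k, x)]) := by
        simp only [stepA, altFun, posToPrefixA_eq_locate k hk, hseq]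
      rw [hstep, ih (k + 1) _ _ (by omega) ?_]
      · simp
      · intro i hi hki
        rw [PySem.Dict.getD_insert]
        by_cases hpe : (locate i).1 = (locate k).1
        · rw [if_pos hpe]
          have hst := locate_fst_inj i k hi hk hpe
          have := (locate_start_bounds k hk).2
          rw [hst, if_pos (by omega)]
          omega
        · rw [if_neg hpe, hinv i hi (by omega)]
          have hgt : ¬ (locate i).2 ≤ k := by
            intro hle
            exact hpe (congrArg Prod.fst (locate_same i k hk (by omega) hle)).symm
          rw [if_neg hgt]
          split_ifs <;> omega

theorem assign_codes_eq_alt (l : List String) : assign_codes l = assign_codes_alt l := by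
  unfold assign_codes assign_codes_alt
  rw [foldA_inv l 0 catCountersA [] le_rfl ?_]
  · simp
  · intro i hi _
    rw [catCountersA_getD_one]
    have := (locate_start_bounds i hi).1
    split_ifs <;> omega

-- ===== VERDICT (by name: the statement is the Claim_ definition above) =====
theorem assign_codes_spec : Claim_equal_assign_codes := by
  intro l _
  exact assign_codes_eq_alt l
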